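-- pv_equiv track=rewrite | github.com/GeorgeA123/NISAExercise1 | exercise1.py | findBestFitness
-- ===== SOURCE A (Python) =====
-- def exerciseThree(bitsX):
--     counter = 0
--     for i in range(0, len(bitsX)):
--         counter += int(bitsX[i])
--
--     return counter
--
-- def findBestFitness(list):
--     bestVa = 0
--     bestEn = []
--     for a in list:
--
--         if exerciseThree(a) > bestVa:
--             bestVa = exerciseThree(a)
--             bestEn.clear()
--             bestEn.append(a)
--         elif exerciseThree(a) == bestVa:
--             bestEn.append(a)
--     return bestEn
-- ===== SOURCE B (Python) =====
-- def findBestFitness(list):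
--     best = max((sum(int(c) for c in a) for a in list), default=0)
--     return [a for a in list if sum(int(c) for c in a) == best]
-- ===== Notes on version B (the rewrite author's own statement) =====
-- stated objective: simpler
-- what changed: Replaces the single-pass running-best state machine (best value + cleared/extended list) with two stateless passes: compute the maximum digit-sum with max(..., default=0), then filter the list for elements attaining it; correct because digit-sums are nonnegative.
import Mathlib
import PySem

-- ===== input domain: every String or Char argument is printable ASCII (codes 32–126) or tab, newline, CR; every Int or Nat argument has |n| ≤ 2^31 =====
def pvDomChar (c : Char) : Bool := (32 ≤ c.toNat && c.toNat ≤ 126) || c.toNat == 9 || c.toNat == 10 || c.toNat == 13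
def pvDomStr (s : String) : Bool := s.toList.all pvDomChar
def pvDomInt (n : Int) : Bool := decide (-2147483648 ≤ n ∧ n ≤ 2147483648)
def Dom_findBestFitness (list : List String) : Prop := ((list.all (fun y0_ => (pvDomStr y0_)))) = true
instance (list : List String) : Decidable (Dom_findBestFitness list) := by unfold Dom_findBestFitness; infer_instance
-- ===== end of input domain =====

-- B replaces A's running-best state machine with two stateless passes (max of the digit-sums, then a filter); simpler decomposition, same cost.


-- ===== PORT A =====
-- int(c) for a one-character string c; exact (ofChars? = some …) on the digit-only strings Pre_ admits
def pvCharInt (c : Char) : Int := (PySem.Int.ofChars? [c]).getD 0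

def exerciseThree (bitsX : String) : Int :=
  (PySem.List.pyRange 0 (PySem.Str.len bitsX) 1).foldl
    (fun counter i => counter + pvCharInt ((PySem.Str.pyGet? bitsX i).getD '0')) 0

def findBestFitness (list : List String) : List String :=
  (list.foldl
    (fun (st : Int × List String) a =>
      if exerciseThree a > st.1 then (exerciseThree a, [a])
      else if exerciseThree a == st.1 then (st.1, st.2 ++ [a])
      else st)
    ((0 : Int), ([] : List String))).2

-- ===== PORT B =====
-- sum(int(c) for c in a)
def pvSumInt (a : String) : Int := (a.toList.map pvCharInt).sum

def findBestFitness_alt (list : List String) : List String :=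
  let best : Int := (PySem.List.max? (list.map pvSumInt) (fun x => x)).getD 0
  list.filter (fun a => pvSumInt a == best)

-- ===== PRECONDITION & SPEC =====
-- Pre_ excludes exactly the inputs on which A raises: int(c) is a ValueError for any
-- single non-digit character, so every character of every string must be a decimal digit.
def Pre_findBestFitness (list : List String) : Prop :=
  (list.all (fun a => a.toList.all (fun c => 47 < c.toNat && c.toNat < 58))) = true
instance (list : List String) : Decidable (Pre_findBestFitness list) := by
  unfold Pre_findBestFitness; infer_instance

def pvWitness_findBestFitness : List String := []

def Spec_findBestFitness (list : List String) (out : List String) : Prop := out = findBestFitness_alt list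
instance (list : List String) (out : List String) : Decidable (Spec_findBestFitness list out) := by unfold Spec_findBestFitness; infer_instance

-- ===== CLAIM (what is proved, stated in full; the proofs are below) =====
def Claim_equal_findBestFitness : Prop := ∀ (list : List String), Dom_findBestFitness list → Pre_findBestFitness list → Spec_findBestFitness list (findBestFitness list)

-- ===== LEMMAS AND PROOFS =====

-- proof-only abbreviations: A's loop step (with the digit-sum named) and its running maximum
def pvStep (st : Int × List String) (a : String) : Int × List String :=
  if pvSumInt a > st.1 then (pvSumInt a, [a])
  else if pvSumInt a == st.1 then (st.1, st.2 ++ [a])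
  else st

def pvMaxFrom (v : Int) (l : List String) : Int :=
  l.foldl (fun m a => max m (pvSumInt a)) v

theorem pv_digit_mem (c : Char) (h : c.isDigit = true) :
    c ∈ ['0','1','2','3','4','5','6','7','8','9'] := by
  have h1 : 48 ≤ c.toNat ∧ c.toNat ≤ 57 := by
    simp [Char.isDigit, UInt32.le_iff_toNat_le] at h
    omega
  obtain ⟨hl, hr⟩ := h1
  interval_cases hn : c.toNat <;>
    simp_all [List.mem_cons, Char.ext_iff, ← UInt32.toNat_inj]

theorem pvCharInt_nonneg (c : Char) (h : c.isDigit = true) : 0 ≤ pvCharInt c := by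
  have := pv_digit_mem c h
  fin_cases this <;> decide

theorem pvSumInt_nonneg (a : String) (h : ∀ c ∈ a.toList, c.isDigit = true) :
    0 ≤ pvSumInt a := by
  unfold pvSumInt
  apply List.sum_nonneg
  intro x hx
  obtain ⟨c, hc, rfl⟩ := List.mem_map.mp hx
  exact pvCharInt_nonneg c (h c hc)

theorem pv_foldl_add_eq_sum (f : Char → Int) :
    ∀ (cs : List Char) (acc : Int),
      cs.foldl (fun a c => a + f c) acc = acc + (cs.map f).sum := by
  intro cs
  induction cs with
  | nil => intro acc; simp
  | cons c t ih => intro acc; simp [ih, add_assoc]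

theorem exerciseThree_eq (s : String) : exerciseThree s = pvSumInt s := by
  unfold exerciseThree pvSumInt
  have h1 : PySem.Str.len s = (s.toList.length : Int) := by simp [PySem.Str.len_eq]
  rw [h1]
  have h2 : (PySem.List.pyRange 0 ((s.toList.length : Int)) 1).foldl
      (fun counter i => counter + pvCharInt (PySem.List.pyGetD s.toList i '0')) 0
      = s.toList.foldl (fun counter c => counter + pvCharInt c) 0 := by
    exact PySem.List.foldl_pyRange_zero_pyGetD s.toList '0'
      (fun counter c => counter + pvCharInt c) 0
  have h3 : ∀ i : Int, (PySem.Str.pyGet? s i).getD '0' = PySem.List.pyGetD s.toList i '0' := by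
    intro i
    simp [PySem.Str.pyGet?, PySem.List.pyGetD, PySem.List.pyGet?]
  simp only [h3]
  rw [h2, pv_foldl_add_eq_sum]
  simp

theorem pv_self_le_maxFrom : ∀ (l : List String) (v : Int), v ≤ pvMaxFrom v l := by
  intro l
  induction l with
  | nil => intro v; simp [pvMaxFrom]
  | cons a t ih =>
      intro v
      have := ih (max v (pvSumInt a))
      calc v ≤ max v (pvSumInt a) := le_max_left _ _
        _ ≤ pvMaxFrom (max v (pvSumInt a)) t := this
        _ = pvMaxFrom v (a :: t) := by simp [pvMaxFrom]

theorem pv_loop_eq : ∀ (l : List String) (v : Int) (e : List String),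
    l.foldl pvStep (v, e) =
      (pvMaxFrom v l,
        (if pvMaxFrom v l = v then e else []) ++ l.filter (fun a => pvSumInt a == pvMaxFrom v l)) := by
  intro l
  induction l with
  | nil => intro v e; simp [pvMaxFrom]
  | cons a t ih =>
      intro v e
      have hM : pvMaxFrom v (a :: t) = pvMaxFrom (max v (pvSumInt a)) t := by simp [pvMaxFrom]
      by_cases hgt : pvSumInt a > v
      · have hmax : max v (pvSumInt a) = pvSumInt a := max_eq_right (le_of_lt hgt)
        have hle : pvSumInt a ≤ pvMaxFrom (pvSumInt a) t := pv_self_le_maxFrom t _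
        have hMne : pvMaxFrom v (a :: t) ≠ v := by
          rw [hM, hmax]; omega
        have hstep : (a :: t).foldl pvStep (v, e) = t.foldl pvStep (pvSumInt a, [a]) := by
          simp [pvStep, hgt]
        rw [hstep, ih, if_neg hMne, hM, hmax]
        by_cases heq : pvMaxFrom (pvSumInt a) t = pvSumInt a
        · simp [heq, List.filter]
        · have : ¬ (pvSumInt a == pvMaxFrom (pvSumInt a) t) = true := by
            simp; omega
          simp [heq, List.filter, this]
      · have hmax : max v (pvSumInt a) = v := max_eq_left (by omega)
        have hM2 : pvMaxFrom v (a :: t) = pvMaxFrom v t := by rw [hM, hmax]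
        rw [hM2]
        by_cases heq : pvSumInt a = v
        · have hstep : (a :: t).foldl pvStep (v, e) = t.foldl pvStep (v, e ++ [a]) := by
            simp [pvStep, heq]
          rw [hstep, ih]
          by_cases hMv : pvMaxFrom v t = v
          · simp [hMv, List.filter, show (pvSumInt a == v) = true by simp [heq]]
          · have hvlt : v < pvMaxFrom v t :=
              lt_of_le_of_ne (pv_self_le_maxFrom t v) (fun h => hMv h.symm)
            simp [hMv, List.filter,
              show ¬ (pvSumInt a == pvMaxFrom v t) = true by simp [heq]; omega]
        · have hlt : pvSumInt a < v := lt_of_le_of_ne (by omega) heq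
          have hstep : (a :: t).foldl pvStep (v, e) = t.foldl pvStep (v, e) := by
            simp [pvStep, hgt, heq]
          rw [hstep, ih]
          have hne : ¬ (pvSumInt a == pvMaxFrom v t) = true := by
            have := pv_self_le_maxFrom t v
            simp; omega
          simp [List.filter, hne]

theorem pv_stepA_eq : (fun (st : Int × List String) a =>
      if exerciseThree a > st.1 then (exerciseThree a, [a])
      else if exerciseThree a == st.1 then (st.1, st.2 ++ [a])
      else st) = pvStep := by
  funext st a
  simp [pvStep, exerciseThree_eq]

theorem pv_best_eq (list : List String) (h : ∀ a ∈ list, 0 ≤ pvSumInt a) :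
    (PySem.List.max? (list.map pvSumInt) (fun x => x)).getD 0 = pvMaxFrom 0 list := by
  cases list with
  | nil => simp [pvMaxFrom, PySem.List.max?]
  | cons x t =>
      have hx : 0 ≤ pvSumInt x := h x (by simp)
      rw [List.map_cons, PySem.List.max?_id_cons]
      have : pvMaxFrom 0 (x :: t) = pvMaxFrom (pvSumInt x) t := by
        simp [pvMaxFrom, max_eq_right hx]
      rw [this]
      simp [pvMaxFrom, List.foldl_map]

-- ===== VERDICT (by name: the statement is the Claim_ definition above) =====
theorem findBestFitness_spec : Claim_equal_findBestFitness := by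
  intro list _hdom hpre
  unfold Spec_findBestFitness findBestFitness findBestFitness_alt
  rw [pv_stepA_eq, pv_loop_eq]
  have hpre' : ∀ a ∈ list, ∀ c ∈ a.toList, c.isDigit = true := by
    intro a ha c hc
    unfold Pre_findBestFitness at hpre
    simp only [List.all_eq_true] at hpre
    have hb := hpre a ha c hc
    simp only [Bool.and_eq_true, decide_eq_true_eq] at hb
    simp [Char.isDigit, UInt32.le_iff_toNat_le]
    omega
  have hnn : ∀ a ∈ list, 0 ≤ pvSumInt a := fun a ha => pvSumInt_nonneg a (hpre' a ha)
  rw [pv_best_eq list hnn]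
  by_cases h0 : pvMaxFrom 0 list = 0 <;> simp [h0]
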